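-- pv_equiv track=rewrite | github.com/harshavarmak/google-foobar | foobarTheGrandestStairCaseOfThemAll.py | solution
-- ===== SOURCE A (Python) =====
-- def solution(bricks):
--     staircase = [[0] * bricks for i in range(bricks + 1)]
--     staircase[0][0] = 1
--     staircase[1][1] = 1
--     staircase[2][2] = 1
--     for i in range(bricks +1):
--         for j in range(1, bricks):
--             staircase[i][j] = staircase[i][j-1]
--             if(i >= j):
--                 staircase[i][j] += staircase[i-j][j-1]
--     return staircase[bricks][bricks-1]
-- ===== SOURCE B (Python) =====
-- def solution(bricks):
--     n = bricks
--     # kmax: the largest k with k*(k+1)//2 <= n, i.e. the most steps a staircase can have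
--     kmax = 0
--     while (kmax + 1) * (kmax + 2) // 2 <= n:
--         kmax += 1
--     if kmax < 2:
--         return 0
--     # rows[m][k] = number of partitions of m into exactly k (not necessarily
--     # distinct) parts; only k <= kmax is ever needed.
--     rows = [[1] + [0] * kmax]
--     for m in range(1, n + 1):
--         rows.append([0] + [rows[m - 1][k - 1] + (rows[m - k][k] if m >= k else 0)
--                            for k in range(1, kmax + 1)])
--     # staircase bijection: partitions of n into exactly k DISTINCT parts
--     # correspond to partitions of n - k*(k-1)//2 into exactly k parts
--     # (subtract 0,1,...,k-1 from the sorted parts); sum over k >= 2 steps.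
--     return sum(rows[n - k * (k - 1) // 2][k] for k in range(2, kmax + 1))
-- ===== Notes on version B (the rewrite author's own statement) =====
-- stated objective: faster
-- what changed: Instead of A's O(n^2) include/exclude knapsack over step sizes 1..n-1, B counts staircases by their number of steps k: via the staircase bijection (subtract 0..k-1 from the sorted steps), staircases with exactly k distinct steps correspond to ordinary partitions of n-k(k-1)/2 into exactly k parts, so B fills the exact-k-parts partition table p(m,k) only for k up to kmax~sqrt(2n) and sums p(n-k(k-1)/2,k) for k>=2.
-- outside the precondition, e.g. on solution(2): A raises IndexError, B returns 0
import Mathlib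
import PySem

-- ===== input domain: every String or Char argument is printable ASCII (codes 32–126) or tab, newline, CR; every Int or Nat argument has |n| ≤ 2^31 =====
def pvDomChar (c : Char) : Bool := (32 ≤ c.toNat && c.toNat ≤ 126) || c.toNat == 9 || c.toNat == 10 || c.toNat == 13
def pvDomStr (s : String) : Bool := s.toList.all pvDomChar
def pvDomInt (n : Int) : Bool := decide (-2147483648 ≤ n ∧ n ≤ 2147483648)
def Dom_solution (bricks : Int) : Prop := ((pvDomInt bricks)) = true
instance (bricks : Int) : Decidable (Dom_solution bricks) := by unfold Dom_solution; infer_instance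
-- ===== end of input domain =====

-- B counts staircases by their number of steps k via the staircase bijection
-- (exactly k distinct parts of n ↔ exactly k parts of n - k(k-1)/2), filling an
-- exact-k-parts table only up to k ≈ √(2n) (objective: faster, asymptotic).

-- ===== PORT A =====
-- Python lists are dynamic arrays: the 2-D table is Array (Array Int) with O(1) reads
-- and in-place writes.  Under Pre_ every index below is nonnegative and in range, where
-- these total forms agree exactly with Python's indexing (Python raises outside Pre_).
def get2 (st : Array (Array Int)) (i j : Int) : Int :=
  if 0 ≤ i ∧ 0 ≤ j then (st.getD i.toNat #[]).getD j.toNat 0 else 0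

def set2 (st : Array (Array Int)) (i j : Int) (v : Int) : Array (Array Int) :=
  if 0 ≤ i ∧ 0 ≤ j then st.modify i.toNat (fun row => row.setIfInBounds j.toNat v) else st

-- body of the inner 'for j' loop: 'staircase[i][j] = staircase[i][j-1]; if i >= j: staircase[i][j] += staircase[i-j][j-1]'
def innerStepA (st : Array (Array Int)) (i j : Int) : Array (Array Int) :=
  let st1 := set2 st i j (get2 st i (j-1))
  if i ≥ j then set2 st1 i j (get2 st1 i j + get2 st1 (i-j) (j-1)) else st1

-- body of the outer 'for i' loop
def rowA (bricks : Int) (st : Array (Array Int)) (i : Int) : Array (Array Int) :=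
  (PySem.List.pyRange 1 bricks 1).foldl (fun st j => innerStepA st i j) st

def solution (bricks : Int) : Int :=
  let st := Array.replicate (bricks + 1).toNat (Array.replicate bricks.toNat (0 : Int))
  let st := set2 st 0 0 1
  let st := set2 st 1 1 1
  let st := set2 st 2 2 1
  let st := (PySem.List.pyRange 0 (bricks + 1) 1).foldl (rowA bricks) st
  get2 st bricks (bricks - 1)

-- ===== PORT B =====
-- 'kmax = 0; while (kmax+1)*(kmax+2)//2 <= n: kmax += 1' (operands nonnegative, so Nat '/' is Python's '//')
def kmaxAux (n : Int) (k : Nat) : Nat :=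
  if (((k + 1) * (k + 2) / 2 : Nat) : Int) ≤ n then kmaxAux n (k + 1) else k
termination_by n.toNat - k
decreasing_by
  have h1 : (k + 1) ≤ (k + 1) * (k + 2) / 2 := by
    have h2 : (k + 1) * 2 / 2 ≤ (k + 1) * (k + 2) / 2 :=
      Nat.div_le_div_right (Nat.mul_le_mul_left (k + 1) (by omega))
    simpa using h2
  omega

-- '[0] + [rows[m-1][k-1] + (rows[m-k][k] if m >= k else 0) for k in range(1, kmax+1)]'
-- all indices here are nonnegative and in range, so Nat-indexed Array getD is exactly Python's indexing
def rowOfB (kmax : Nat) (rows : Array (Array Int)) (m : Nat) : Array Int :=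
  ((0 : Int) :: (List.range' 1 kmax).map (fun k =>
    (rows.getD (m - 1) #[]).getD (k - 1) 0 +
      (if m ≥ k then (rows.getD (m - k) #[]).getD k 0 else 0))).toArray

def solution_alt (bricks : Int) : Int :=
  let n := bricks
  let kmax := kmaxAux n 0
  if kmax < 2 then 0
  else
    -- the loop 'for m in range(1, n+1)' runs over nonnegative m (n ≥ 3 once kmax ≥ 2); append = push
    let rows := (List.range' 1 n.toNat).foldl
      (fun rows m => rows.push (rowOfB kmax rows m)) #[((1 : Int) :: List.replicate kmax 0).toArray]
    ((List.range' 2 (kmax - 1)).map (fun k =>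
        (rows.getD (n.toNat - k * (k - 1) / 2) #[]).getD k 0)).sum

-- ===== PRECONDITION & SPEC =====
-- A raises IndexError for every bricks ≤ 2 (table too small for the seed writes / final read); it returns on exactly bricks ≥ 3.
def Pre_solution (bricks : Int) : Prop := 3 ≤ bricks
instance (bricks : Int) : Decidable (Pre_solution bricks) := by unfold Pre_solution; infer_instance

def pvWitness_solution : Int := 4

def Spec_solution (bricks : Int) (out : Int) : Prop := out = solution_alt bricks
instance (bricks : Int) (out : Int) : Decidable (Spec_solution bricks out) := by unfold Spec_solution; infer_instance

-- ===== CLAIM (what is proved, stated in full; the proofs are below) =====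
def Claim_equal_solution : Prop := ∀ (bricks : Int), Dom_solution bricks → Pre_solution bricks → Spec_solution bricks (solution bricks)

-- ===== LEMMAS AND PROOFS =====

-- list model of port A (Python semantics on lists; the array port is bridged to it below)
def get2L (st : List (List Int)) (i j : Int) : Int :=
  PySem.List.pyGetD (PySem.List.pyGetD st i []) j 0

def set2L (st : List (List Int)) (i j : Int) (v : Int) : List (List Int) :=
  PySem.List.pySetD st i (PySem.List.pySetD (PySem.List.pyGetD st i []) j v)

def innerStepL (st : List (List Int)) (i j : Int) : List (List Int) :=
  let st1 := set2L st i j (get2L st i (j-1))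
  if i ≥ j then set2L st1 i j (get2L st1 i j + get2L st1 (i-j) (j-1)) else st1

def rowL (bricks : Int) (st : List (List Int)) (i : Int) : List (List Int) :=
  (PySem.List.pyRange 1 bricks 1).foldl (fun st j => innerStepL st i j) st

def solutionL (bricks : Int) : Int :=
  let st := List.replicate (bricks + 1).toNat (List.replicate bricks.toNat (0 : Int))
  let st := set2L st 0 0 1
  let st := set2L st 1 1 1
  let st := set2L st 2 2 1
  let st := (PySem.List.pyRange 0 (bricks + 1) 1).foldl (rowL bricks) st
  get2L st bricks (bricks - 1)

-- list model of port B's row builder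
def rowOfBL (kmax : Nat) (rows : List (List Int)) (m : Nat) : List Int :=
  0 :: (List.range' 1 kmax).map (fun k =>
    (rows.getD (m - 1) []).getD (k - 1) 0 +
      (if m ≥ k then (rows.getD (m - k) []).getD k 0 else 0))


-- q-table (A's semantics): Q i j = number of partitions of i into distinct parts from {1,…,j}
def Q : Nat → Nat → Int
  | i, 0 => if i = 0 then 1 else 0
  | i, j + 1 => Q i (j) + if j + 1 ≤ i then Q (i - (j + 1)) j else 0

-- Pp m k = number of partitions of m into exactly k (not necessarily distinct) parts
def Pp : Nat → Nat → Int
  | 0, 0 => 1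
  | 0, _ + 1 => 0
  | _ + 1, 0 => 0
  | m + 1, k + 1 => Pp m k + if k + 1 ≤ m + 1 then Pp (m - k) (k + 1) else 0
termination_by m k => (m, k)
decreasing_by all_goals exact Prod.Lex.left _ _ (by omega)

-- Eb n k j = number of partitions of n into exactly k DISTINCT parts from {1,…,j}
def Eb : Nat → Nat → Nat → Int
  | n, k, 0 => if n = 0 ∧ k = 0 then 1 else 0
  | n, k, j + 1 => Eb n k j + if j + 1 ≤ n ∧ 1 ≤ k then Eb (n - (j + 1)) (k - 1) j else 0

theorem Eb_succ (n k j : Nat) : Eb n k (j + 1) =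
    Eb n k j + if j + 1 ≤ n ∧ 1 ≤ k then Eb (n - (j + 1)) (k - 1) j else 0 := rfl

-- tri k = k(k-1)/2
def tri : Nat → Nat
  | 0 => 0
  | k + 1 => tri k + k

theorem tri_eq (k : Nat) : tri k = k * (k - 1) / 2 := by
  have h : 2 * tri k = k * (k - 1) := by
    induction k with
    | zero => rfl
    | succ k ih =>
      simp only [tri]
      have e : (k + 1) * (k + 1 - 1) = k * (k - 1) + 2 * k := by
        cases k with
        | zero => rfl
        | succ k' => simp only [Nat.add_sub_cancel]; ring
      omega
  omega

theorem Eb_k_zero (j n : Nat) : Eb n 0 j = if n = 0 then 1 else 0 := by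
  induction j with
  | zero => simp [Eb]
  | succ j ih => simp [Eb, ih]

theorem Eb_lt (j : Nat) : ∀ n k, n < k → Eb n k j = 0 := by
  induction j with
  | zero => intro n k h; simp only [Eb]; rw [if_neg (by omega)]
  | succ j ih =>
    intro n k h
    simp only [Eb]
    rw [ih n k h]
    rcases Nat.lt_or_ge n (j + 1) with hn | hn
    · rw [if_neg (by omega)]; ring
    · rw [if_pos (by omega), ih _ _ (by omega)]; ring

theorem Eb_one (j : Nat) : ∀ n, Eb n 1 j = if 1 ≤ n ∧ n ≤ j then 1 else 0 := by
  induction j with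
  | zero =>
    intro n
    simp only [Eb]
    rw [if_neg (by omega)]
    split_ifs with h
    · omega
    · rfl
  | succ j ih =>
    intro n
    simp only [Eb]
    rw [ih n]
    simp only [Nat.sub_self, Eb_k_zero]
    split_ifs <;> omega

-- subtract 1 from every part: the key recurrence of the staircase bijection
theorem Eb_sub (j : Nat) : ∀ n k, 1 ≤ k → k ≤ n →
    Eb n k (j + 1) = Eb (n - k) k j + Eb (n - k) (k - 1) j := by
  induction j with
  | zero =>
    intro n k hk hkn
    simp only [Eb]
    split_ifs <;> omega
  | succ j ih =>
    intro n k hk hkn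
    rcases Nat.lt_or_ge k 2 with hk1 | hk2
    · -- k = 1
      have hk' : k = 1 := by omega
      subst hk'
      simp only [Eb_one, Nat.sub_self, Eb_k_zero]
      split_ifs <;> omega
    · -- k ≥ 2
      rw [Eb_succ n k (j + 1), ih n k hk hkn,
        Eb_succ (n - k) k j, Eb_succ (n - k) (k - 1) j]
      rcases Nat.lt_or_ge n (j + 2) with hc | hc
      · -- outer guard false, inner guards false
        rw [if_neg (by omega), if_neg (by omega), if_neg (by omega)]
        ring
      · rcases Nat.lt_or_ge (n - (j + 2)) (k - 1) with hs | hs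
        · -- too little left for k-1 distinct parts: all extras vanish
          rw [if_pos (by omega), Eb_lt (j + 1) _ _ (by omega),
            if_neg (by omega), if_neg (by omega)]
          ring
        · -- main case: apply IH at (n - (j+2), k - 1)
          rw [if_pos (by omega), ih (n - (j + 1 + 1)) (k - 1) (by omega) (by omega),
            if_pos (by omega), if_pos (by omega)]
          have e1 : n - (j + 1 + 1) - (k - 1) = n - k - (j + 1) := by omega
          rw [e1]
          ring

theorem Pp_k_zero (m : Nat) : Pp m 0 = if m = 0 then 1 else 0 := by
  cases m <;> simp [Pp]

theorem Pp_succ (m k : Nat) (hm : 1 ≤ m) (hk : 1 ≤ k) :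
    Pp m k = Pp (m - 1) (k - 1) + if k ≤ m then Pp (m - k) k else 0 := by
  obtain ⟨m', rfl⟩ : ∃ m', m = m' + 1 := ⟨m - 1, by omega⟩
  obtain ⟨k', rfl⟩ : ∃ k', k = k' + 1 := ⟨k - 1, by omega⟩
  simp only [Pp, Nat.add_sub_cancel]
  congr 1
  rcases Nat.lt_or_ge m' k' with h | h
  · rw [if_neg (by omega), if_neg (by omega)]
  · rw [if_pos (by omega), if_pos (by omega)]
    congr 1
    omega

theorem Pp_lt : ∀ m k, m < k → Pp m k = 0 := by
  intro m
  induction m using Nat.strong_induction_on with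
  | _ m ih =>
    intro k h
    match m, k, h with
    | 0, k + 1, _ => simp [Pp]
    | m + 1, k + 1, h =>
      simp only [Pp]
      rw [ih m (by omega) k (by omega), if_neg (by omega)]
      ring

theorem Pp_one (m : Nat) : Pp m 1 = if 1 ≤ m then 1 else 0 := by
  induction m with
  | zero => simp [Pp]
  | succ m ih =>
    simp only [Pp, Pp_k_zero, Nat.sub_zero, Nat.zero_add, ih]
    split_ifs <;> omega

-- once the part bound j is ≥ n it is inactive, and the staircase bijection applies
theorem Eb_ge : ∀ n k j, n ≤ j → Eb n k j = Pp (n - tri k) k := by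
  intro n
  induction n using Nat.strong_induction_on with
  | _ n ih =>
    intro k j hnj
    rcases Nat.eq_zero_or_pos k with hk0 | hk1
    · subst hk0
      rw [Eb_k_zero, tri, Nat.sub_zero, Pp_k_zero]
    rcases Nat.lt_or_ge n k with hnk | hkn
    · rw [Eb_lt _ _ _ hnk, Pp_lt _ _ (by omega)]
    -- 1 ≤ k ≤ n, so 1 ≤ n ≤ j
    obtain ⟨j', rfl⟩ : ∃ j', j = j' + 1 := ⟨j - 1, by omega⟩
    rw [Eb_sub j' n k hk1 hkn,
      ih (n - k) (by omega) k j' (by omega),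
      ih (n - k) (by omega) (k - 1) j' (by omega)]
    have htri : tri k = tri (k - 1) + (k - 1) := by
      obtain ⟨k', rfl⟩ : ∃ k', k = k' + 1 := ⟨k - 1, by omega⟩
      simp [tri]
    rcases Nat.lt_or_ge n (tri k + 1) with hb | hb
    · -- n ≤ tri k : everything is 0
      have hk2 : 2 ≤ k := by
        rcases Nat.lt_or_ge k 2 with h2 | h2
        · exfalso; interval_cases k <;> simp [tri] at hb <;> omega
        · exact h2
      rw [show n - k - tri k = 0 by omega, show n - k - tri (k - 1) = 0 by omega,
        show n - tri k = 0 by omega]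
      rw [Pp_lt 0 k (by omega), Pp_lt 0 (k - 1) (by omega)]
      ring
    · -- tri k < n : unfold Pp at (n - tri k, k)
      rw [Pp_succ (n - tri k) k (by omega) hk1]
      have e1 : n - tri k - 1 = n - k - tri (k - 1) := by omega
      rw [e1]
      rcases Nat.lt_or_ge n (tri k + k) with hc | hc
      · rw [if_neg (by omega), show n - k - tri k = 0 by omega, Pp_lt 0 k (by omega)]
        ring
      · rw [if_pos (by omega), show n - tri k - k = n - k - tri k by omega]
        ring

-- A's q-value is the sum of the exact-k distinct counts
theorem Q_sum (j : Nat) : ∀ n N, n < N → Q n j = ∑ k ∈ Finset.range N, Eb n k j := by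
  induction j with
  | zero =>
    intro n N hn
    simp only [Q, Eb]
    rcases Nat.eq_zero_or_pos n with rfl | hpos
    · rw [if_pos rfl]
      rw [Finset.sum_eq_single 0]
      · simp
      · intro b _ hb; rw [if_neg (by omega)]
      · intro h; exact absurd (Finset.mem_range.mpr hn) h
    · rw [if_neg (by omega), Finset.sum_eq_zero]
      intro b _; rw [if_neg (by omega)]
  | succ j ih =>
    intro n N hn
    obtain ⟨N', rfl⟩ : ∃ N', N = N' + 1 := ⟨N - 1, by omega⟩
    simp only [Q, Eb]
    rw [Finset.sum_add_distrib, ← ih n (N' + 1) hn]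
    congr 1
    rcases Nat.lt_or_ge n (j + 1) with hc | hc
    · rw [if_neg (by omega), Finset.sum_eq_zero]
      intro b _; rw [if_neg (by omega)]
    · rw [if_pos (by omega)]
      rw [Finset.sum_range_succ']
      simp only [if_neg (show ¬(j + 1 ≤ n ∧ (1:Nat) ≤ 0) by omega), add_zero]
      rw [ih (n - (j + 1)) N' (by omega)]
      apply Finset.sum_congr rfl
      intro k _
      rw [if_pos (by omega)]
      simp

theorem Q_zero_left (j : Nat) : Q 0 j = 1 := by
  induction j with
  | zero => simp [Q]
  | succ j ih => simp [Q, ih]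

-- ((List.range N).map f).sum = Finset.range sum
theorem sum_map_range (N : Nat) (f : Nat → Int) :
    ((List.range N).map f).sum = ∑ k ∈ Finset.range N, f k := by
  induction N with
  | zero => simp
  | succ N ih => rw [List.range_succ, List.map_append, List.sum_append,
      Finset.sum_range_succ, ih]; simp

-- kmaxAux post-conditions
theorem kmaxAux_post (n : Int) : ∀ k : Nat,
    ¬ ((((kmaxAux n k + 1) * (kmaxAux n k + 2) / 2 : Nat) : Int) ≤ n) := by
  intro k
  induction k using kmaxAux.induct n with
  | case1 k hc ih => rw [kmaxAux, if_pos hc]; exact ih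
  | case2 k hc => rw [kmaxAux, if_neg hc]; exact hc

theorem kmaxAux_post2 (n : Int) : ∀ k : Nat,
    (k = 0 ∨ (((k * (k + 1) / 2 : Nat) : Int) ≤ n)) →
    (kmaxAux n k = 0 ∨ ((((kmaxAux n k) * (kmaxAux n k + 1) / 2 : Nat) : Int) ≤ n)) := by
  intro k
  induction k using kmaxAux.induct n with
  | case1 k hc ih =>
    intro _
    rw [kmaxAux, if_pos hc]
    exact ih (Or.inr (by exact_mod_cast hc))
  | case2 k hc =>
    intro h
    rw [kmaxAux, if_neg hc]
    exact h

-- rows-table invariant for B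
def rowP (kmax m : Nat) : List Int := (List.range (kmax + 1)).map (fun k => Pp m k)

theorem rowP_zero (kmax : Nat) : rowP kmax 0 = 1 :: List.replicate kmax 0 := by
  unfold rowP
  rw [List.range_succ_eq_map, List.map_cons, List.map_map]
  rw [show ((fun k => Pp 0 k) ∘ Nat.succ) = (fun _ : Nat => (0 : Int)) from
    funext fun k => by simp [Pp]]
  simp [Pp, List.map_const']

theorem getD_rowsP (kmax t m : Nat) (hm : m ≤ t) :
    (((List.range (t + 1)).map (rowP kmax)).getD m []) = rowP kmax m :=
  PySem.List.getD_map_range (rowP kmax) (t + 1) m [] (by omega)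

theorem getD_rowP (kmax m k : Nat) (hk : k ≤ kmax) : (rowP kmax m).getD k 0 = Pp m k :=
  PySem.List.getD_map_range (fun k => Pp m k) (kmax + 1) k 0 (by omega)

theorem rowOfB_eq (kmax t : Nat) :
    rowOfBL kmax ((List.range (t + 1)).map (rowP kmax)) (t + 1) = rowP kmax (t + 1) := by
  have hhead : rowP kmax (t + 1) =
      Pp (t + 1) 0 :: (List.range' 1 kmax).map (fun k => Pp (t + 1) k) := by
    unfold rowP
    rw [List.range_eq_range', List.range'_succ, List.map_cons, show (0 : Nat) + 1 = 1 from rfl]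
  rw [rowOfBL, hhead, Pp_k_zero, if_neg (by omega)]
  congr 1
  apply List.map_congr_left
  intro k hk
  rw [List.mem_range'_1] at hk
  simp only [Nat.add_sub_cancel]
  rw [getD_rowsP kmax t t (le_refl t), getD_rowP kmax t (k - 1) (by omega)]
  rw [Pp_succ (t + 1) k (by omega) (by omega), Nat.add_sub_cancel]
  congr 1
  rcases Nat.lt_or_ge (t + 1) k with h | h
  · rw [if_neg (by omega), if_neg (by omega)]
  · rw [if_pos (by omega), if_pos (by omega),
      getD_rowsP kmax t (t + 1 - k) (by omega), getD_rowP kmax (t + 1 - k) k (by omega)]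

theorem rows_eq (kmax : Nat) : ∀ t : Nat,
    (List.range' 1 t).foldl (fun rows m => rows ++ [rowOfBL kmax rows m])
      [1 :: List.replicate kmax 0] = (List.range (t + 1)).map (rowP kmax) := by
  intro t
  induction t with
  | zero => simp [rowP_zero]
  | succ t ih =>
    rw [List.range'_concat, List.foldl_append, ih]
    simp only [List.foldl_cons, List.foldl_nil, Nat.one_mul]
    rw [show 1 + t = t + 1 by omega, rowOfB_eq kmax t]
    simp [List.range_succ]

-- ----- A side -----

def val (st : List (List Int)) (r c : Nat) : Int := (st.getD r []).getD c 0

theorem getD_set_self' {α : Type} (l : List α) (i : Nat) (v d : α) (h : i < l.length) :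
    (l.set i v).getD i d = v := by
  simp [List.getD_eq_getElem?_getD, h]

theorem getD_set_ne' {α : Type} (l : List α) (i j : Nat) (v d : α) (h : i ≠ j) :
    (l.set i v).getD j d = l.getD j d := by
  simp [List.getD_eq_getElem?_getD, List.getElem?_set_ne h]

theorem set2_natCast (st : List (List Int)) (i j : Nat) (v : Int) :
    set2L st (i : Int) (j : Int) v = st.set i ((st.getD i []).set j v) := by
  simp [set2L, PySem.List.pySetD_natCast, PySem.List.pyGetD_natCast]

theorem get2_natCast (st : List (List Int)) (i j : Nat) : get2L st (i : Int) (j : Int) = val st i j := by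
  simp [get2L, val, PySem.List.pyGetD_natCast]

theorem rowlen_set_set (st : List (List Int)) (i j r : Nat) (v : Int) :
    ((st.set i ((st.getD i []).set j v)).getD r []).length = (st.getD r []).length := by
  by_cases hr : r = i
  · subst hr
    by_cases hl : r < st.length
    · rw [getD_set_self' st r _ [] hl, List.length_set]
    · rw [List.set_eq_of_length_le (by omega)]
  · rw [getD_set_ne' st i r _ [] (fun h => hr h.symm)]

theorem val_set_set (st : List (List Int)) (i j r c : Nat) (v : Int)
    (hi : i < st.length) (hj : j < (st.getD i []).length) :
    val (st.set i ((st.getD i []).set j v)) r c = if r = i ∧ c = j then v else val st r c := by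
  unfold val
  by_cases hr : r = i
  · subst hr
    rw [getD_set_self' st r _ [] hi]
    by_cases hc : c = j
    · subst hc
      rw [getD_set_self' _ c v 0 hj]
      simp
    · rw [getD_set_ne' _ j c v 0 (fun h => hc h.symm)]
      simp [hc]
  · rw [getD_set_ne' st i r _ [] (fun h => hr h.symm)]
    simp [hr]

-- one inner-loop step rewrites exactly entry (i, j) from its two sources
theorem innerStepA_val (n i j : Nat) (st : List (List Int))
    (hi : i ≤ n) (hj1 : 1 ≤ j) (hjn : j < n)
    (hlen : st.length = n + 1) (hrow : ∀ r, r ≤ n → (st.getD r []).length = n) :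
    (innerStepL st (i : Int) (j : Int)).length = n + 1 ∧
    (∀ r, r ≤ n → ((innerStepL st (i : Int) (j : Int)).getD r []).length = n) ∧
    (∀ r c, val (innerStepL st (i : Int) (j : Int)) r c =
      if r = i ∧ c = j then (val st i (j - 1) + if j ≤ i then val st (i - j) (j - 1) else 0)
      else val st r c) := by
  have hcast1 : ((j : Int) - 1) = ((j - 1 : Nat) : Int) := by
    rw [Nat.cast_sub hj1]; norm_num
  have hi' : i < st.length := by omega
  have hjrow : j < (st.getD i []).length := by rw [hrow i hi]; omega
  unfold innerStepL
  simp only [hcast1, get2_natCast, set2_natCast]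
  by_cases hij : j ≤ i
  · rw [if_pos (by exact_mod_cast hij)]
    have hcast2 : ((i : Int) - (j : Int)) = ((i - j : Nat) : Int) := by rw [Nat.cast_sub hij]
    simp only [hcast2, get2_natCast]
    set st1 := st.set i ((st.getD i []).set j (val st i (j - 1))) with hst1
    have hlen1 : st1.length = n + 1 := by rw [hst1, List.length_set, hlen]
    have hrow1 : ∀ r, r ≤ n → (st1.getD r []).length = n := by
      intro r hr; rw [hst1, rowlen_set_set]; exact hrow r hr
    have hval1 : ∀ r c, val st1 r c = if r = i ∧ c = j then val st i (j - 1) else val st r c :=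
      fun r c => val_set_set st i j r c _ hi' hjrow
    have hij' : val st1 i j = val st i (j - 1) := by rw [hval1]; simp
    have hoth : val st1 (i - j) (j - 1) = val st (i - j) (j - 1) := by
      rw [hval1]; rw [if_neg]; rintro ⟨h1, h2⟩; omega
    refine ⟨by rw [List.length_set, hlen1], fun r hr => by rw [rowlen_set_set]; exact hrow1 r hr, fun r c => ?_⟩
    rw [val_set_set st1 i j r c _ (by omega) (by rw [hrow1 i hi]; omega)]
    by_cases hrc : r = i ∧ c = j
    · rw [if_pos hrc, if_pos hrc, hij', hoth, if_pos hij]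
    · rw [if_neg hrc, if_neg hrc, hval1, if_neg hrc]
  · rw [if_neg (by exact_mod_cast hij)]
    refine ⟨by rw [List.length_set, hlen], fun r hr => by rw [rowlen_set_set]; exact hrow r hr, fun r c => ?_⟩
    rw [val_set_set st i j r c _ hi' hjrow]
    by_cases hrc : r = i ∧ c = j
    · rw [if_pos hrc, if_pos hrc, if_neg hij, add_zero]
    · rw [if_neg hrc, if_neg hrc]

-- invariant after the first i outer iterations
def InvA (n i : Nat) (st : List (List Int)) : Prop :=
  st.length = n + 1 ∧
  (∀ r, r ≤ n → (st.getD r []).length = n) ∧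
  (∀ r, r ≤ n → val st r 0 = Q r 0) ∧
  (∀ r, r < i → ∀ c, c < n → val st r c = Q r c)

-- invariant inside row i, after inner columns 1..m
def InvR (n i m : Nat) (st : List (List Int)) : Prop :=
  InvA n i st ∧ (∀ c, 1 ≤ c → c ≤ m → val st i c = Q i c)

theorem innerStepA_inv (n i j : Nat) (st : List (List Int))
    (hi : i ≤ n) (hj1 : 1 ≤ j) (hjn : j < n) (h : InvR n i (j - 1) st) :
    InvR n i j (innerStepL st (i : Int) (j : Int)) := by
  obtain ⟨⟨hlen, hrow, hcol0, hdone⟩, hcur⟩ := h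
  obtain ⟨hlen', hrow', hval⟩ := innerStepA_val n i j st hi hj1 hjn hlen hrow
  have hprev : val st i (j - 1) = Q i (j - 1) := by
    by_cases h0 : j - 1 = 0
    · rw [h0]; exact hcol0 i hi
    · exact hcur (j - 1) (by omega) (le_refl _)
  refine ⟨⟨hlen', hrow', ?_, ?_⟩, ?_⟩
  · intro r hr
    rw [hval, if_neg (by rintro ⟨_, h2⟩; omega)]
    exact hcol0 r hr
  · intro r hr c hc
    rw [hval, if_neg (by rintro ⟨h1, _⟩; omega)]
    exact hdone r hr c hc
  · intro c hc1 hc2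
    rw [hval]
    by_cases hcj : c = j
    · subst hcj
      rw [if_pos ⟨rfl, rfl⟩, hprev]
      have hQ : Q i c = Q i (c - 1) + if c ≤ i then Q (i - c) (c - 1) else 0 := by
        conv_lhs => rw [show c = (c - 1) + 1 by omega]
        simp only [Q]
        rw [show (c - 1) + 1 = c by omega]
      rw [hQ]
      congr 1
      by_cases hij : c ≤ i
      · rw [if_pos hij, if_pos hij]
        exact hdone (i - c) (by omega) (c - 1) (by omega)
      · rw [if_neg hij, if_neg hij]
    · rw [if_neg (by tauto)]
      exact hcur c hc1 (by omega)

theorem rowA_inv (n i : Nat) (st : List (List Int)) (hn : 1 ≤ n) (hi : i ≤ n) (h : InvA n i st) :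
    InvA n (i + 1) (rowL (n : Int) st (i : Int)) := by
  have aux : ∀ m : Nat, m ≤ n - 1 →
      InvR n i m ((PySem.List.pyRange 1 ((m : Int) + 1) 1).foldl (fun st j => innerStepL st (i : Int) j) st) := by
    intro m
    induction m with
    | zero =>
      intro _
      rw [PySem.List.pyRange_one_eq_nil (by norm_num)]
      exact ⟨h, fun c hc1 hc2 => absurd (le_trans hc1 hc2) (by omega)⟩
    | succ m ih =>
      intro hm
      rw [show ((m + 1 : Nat) : Int) + 1 = ((m : Int) + 1) + 1 by push_cast; ring,
        PySem.List.pyRange_one_succ_right (by omega), List.foldl_append]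
      simp only [List.foldl_cons, List.foldl_nil]
      rw [show ((m : Int) + 1) = ((m + 1 : Nat) : Int) by push_cast; ring]
      exact innerStepA_inv n i (m + 1) _ hi (by omega) (by omega) (by simpa using ih (by omega))
  unfold rowL
  have hfin := aux (n - 1) (le_refl _)
  rw [show ((n - 1 : Nat) : Int) + 1 = (n : Int) by push_cast [Nat.cast_sub (show 1 ≤ n by omega)]; ring] at hfin
  obtain ⟨⟨hlen, hrow, hcol0, hdone⟩, hcur⟩ := hfin
  refine ⟨hlen, hrow, hcol0, ?_⟩
  intro r hr c hc
  by_cases hri : r = i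
  · subst hri
    by_cases hc0 : c = 0
    · rw [hc0]; exact hcol0 r hi
    · exact hcur c (by omega) (by omega)
  · exact hdone r (by omega) c hc

theorem solutionL_eq (n : Nat) (hn : 3 ≤ n) : solutionL (n : Int) = Q n (n - 1) := by
  have hn1 : ((n : Int) + 1).toNat = n + 1 := by omega
  have hnn : ((n : Int)).toNat = n := Int.toNat_natCast n
  unfold solutionL
  simp only [hn1, hnn]
  set st0 : List (List Int) := List.replicate (n + 1) (List.replicate n 0) with hst0
  have hrow0 : ∀ r, r ≤ n → st0.getD r [] = List.replicate n 0 := by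
    intro r hr
    simp [hst0, List.getD_eq_getElem?_getD, (by omega : r < n + 1)]
  have hlen0 : st0.length = n + 1 := by simp [hst0]
  have hval0 : ∀ r c, val st0 r c = 0 := by
    intro r c
    unfold val
    rcases le_or_gt r n with hr | hr
    · rw [hrow0 r hr]
      simp only [List.getD_eq_getElem?_getD, List.getElem?_replicate]
      split <;> rfl
    · have hout : st0.getD r [] = [] := by
        rw [List.getD_eq_getElem?_getD, List.getElem?_eq_none (by omega : st0.length ≤ r)]
        rfl
      rw [hout]
      rfl
  have e0 : set2L st0 0 0 1 = st0.set 0 ((st0.getD 0 []).set 0 1) := by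
    simpa using set2_natCast st0 0 0 1
  rw [e0]
  set s1 := st0.set 0 ((st0.getD 0 []).set 0 1) with hs1
  have e1 : set2L s1 1 1 1 = s1.set 1 ((s1.getD 1 []).set 1 1) := by
    simpa using set2_natCast s1 1 1 1
  rw [e1]
  set s2 := s1.set 1 ((s1.getD 1 []).set 1 1) with hs2
  have e2 : set2L s2 2 2 1 = s2.set 2 ((s2.getD 2 []).set 2 1) := by
    simpa using set2_natCast s2 2 2 1
  rw [e2]
  set s3 := s2.set 2 ((s2.getD 2 []).set 2 1) with hs3
  have hrl0 : ∀ r, r ≤ n → (st0.getD r []).length = n := by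
    intro r hr; rw [hrow0 r hr]; simp
  have hlen1 : s1.length = n + 1 := by rw [hs1, List.length_set, hlen0]
  have hrl1 : ∀ r, r ≤ n → (s1.getD r []).length = n := by
    intro r hr; rw [hs1, rowlen_set_set]; exact hrl0 r hr
  have hlen2 : s2.length = n + 1 := by rw [hs2, List.length_set, hlen1]
  have hrl2 : ∀ r, r ≤ n → (s2.getD r []).length = n := by
    intro r hr; rw [hs2, rowlen_set_set]; exact hrl1 r hr
  have hlen3 : s3.length = n + 1 := by rw [hs3, List.length_set, hlen2]
  have hrl3 : ∀ r, r ≤ n → (s3.getD r []).length = n := by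
    intro r hr; rw [hs3, rowlen_set_set]; exact hrl2 r hr
  have hv1 : ∀ r c, val s1 r c = if r = 0 ∧ c = 0 then 1 else val st0 r c := by
    intro r c
    exact val_set_set st0 0 0 r c 1 (by omega) (by rw [hrl0 0 (by omega)]; omega)
  have hv2 : ∀ r c, val s2 r c = if r = 1 ∧ c = 1 then 1 else val s1 r c := by
    intro r c
    exact val_set_set s1 1 1 r c 1 (by omega) (by rw [hrl1 1 (by omega)]; omega)
  have hv3 : ∀ r c, val s3 r c = if r = 2 ∧ c = 2 then 1 else val s2 r c := by
    intro r c
    exact val_set_set s2 2 2 r c 1 (by omega) (by rw [hrl2 2 (by omega)]; omega)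
  have hInv0 : InvA n 0 s3 := by
    refine ⟨hlen3, hrl3, ?_, fun r hr => by omega⟩
    intro r hr
    rw [hv3, if_neg (by rintro ⟨_, h⟩; omega), hv2, if_neg (by rintro ⟨_, h⟩; omega), hv1]
    by_cases hr0 : r = 0
    · subst hr0; rw [if_pos ⟨rfl, rfl⟩]; simp [Q]
    · rw [if_neg (by tauto), hval0]
      simp [Q, hr0]
  have aux : ∀ i, i ≤ n + 1 →
      InvA n i ((PySem.List.pyRange 0 (i : Int) 1).foldl (rowL (n : Int)) s3) := by
    intro i
    induction i with
    | zero =>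
      intro _
      rw [show ((0 : Nat) : Int) = 0 by norm_num, PySem.List.pyRange_one_eq_nil (le_refl 0)]
      exact hInv0
    | succ i ih =>
      intro hi
      rw [show ((i + 1 : Nat) : Int) = (i : Int) + 1 by push_cast; ring,
        PySem.List.pyRange_one_succ_right (by positivity), List.foldl_append]
      simp only [List.foldl_cons, List.foldl_nil]
      exact rowA_inv n i _ (by omega) (by omega) (ih (by omega))
  have hfin := aux (n + 1) (le_refl _)
  rw [show ((n + 1 : Nat) : Int) = (n : Int) + 1 by push_cast; ring] at hfin
  rw [show ((n : Int) - 1) = ((n - 1 : Nat) : Int) by push_cast [Nat.cast_sub (show 1 ≤ n by omega)]; ring,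
    get2_natCast]
  exact hfin.2.2.2 n (by omega) (n - 1) (by omega)

-- ----- B side evaluation -----

-- ---- bridges between the Array ports and the list model ----
def toL (st : Array (Array Int)) : List (List Int) := st.toList.map Array.toList

theorem agetD_toList {α : Type} (a : Array α) (i : Nat) (d : α) : a.getD i d = a.toList.getD i d := by
  rcases Nat.lt_or_ge i a.size with h | h
  · simp [Array.getD, h, List.getD_eq_getElem?_getD]
  · simp [Array.getD, Nat.not_lt.mpr h, List.getD_eq_getElem?_getD]

theorem toL_getD (st : Array (Array Int)) (i : Nat) :
    (toL st).getD i [] = (st.getD i #[]).toList := by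
  unfold toL
  rw [agetD_toList]
  rw [List.getD_eq_getElem?_getD, List.getD_eq_getElem?_getD, List.getElem?_map]
  cases h : st.toList[i]? <;> simp [h]

theorem list_modify_eq_set {α : Type} (l : List α) (i : Nat) (f : α → α) (d : α) :
    l.modify i f = l.set i (f (l.getD i d)) := by
  apply List.ext_getElem?
  intro j
  rw [List.getElem?_modify, List.getElem?_set]
  rcases Nat.lt_or_ge j l.length with h | h
  · by_cases hij : i = j
    · subst hij
      simp [List.getElem?_eq_getElem h, List.getD_eq_getElem?_getD, h]
    · simp [hij]
  · by_cases hij : i = j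
    · subst hij
      simp [List.getElem?_eq_none (by omega : l.length ≤ i), Nat.not_lt.mpr h]
    · simp [hij]

theorem set2_comm (st : Array (Array Int)) (i j : Nat) (v : Int) :
    toL (set2 st (i : Int) (j : Int) v) = set2L (toL st) (i : Int) (j : Int) v := by
  rw [set2_natCast]
  unfold set2
  rw [if_pos ⟨Int.natCast_nonneg i, Int.natCast_nonneg j⟩]
  simp only [Int.toNat_natCast]
  show (List.map Array.toList (st.modify i _).toList) = _
  rw [Array.toList_modify, list_modify_eq_set _ _ _ #[], List.map_set,
    Array.toList_setIfInBounds, ← agetD_toList, ← toL_getD]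
  rfl

theorem get2_comm (st : Array (Array Int)) (i j : Nat) :
    get2 st (i : Int) (j : Int) = get2L (toL st) (i : Int) (j : Int) := by
  rw [get2_natCast]
  unfold get2 val
  rw [if_pos ⟨Int.natCast_nonneg i, Int.natCast_nonneg j⟩]
  simp only [Int.toNat_natCast]
  rw [agetD_toList, ← toL_getD, ← agetD_toList]

theorem innerStep_comm (st : Array (Array Int)) (i j : Nat) (hj : 1 ≤ j) :
    toL (innerStepA st (i : Int) (j : Int)) = innerStepL (toL st) (i : Int) (j : Int) := by
  have hcast1 : ((j : Int) - 1) = ((j - 1 : Nat) : Int) := by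
    rw [Nat.cast_sub hj]; norm_num
  unfold innerStepA innerStepL
  by_cases hij : (i : Int) ≥ (j : Int)
  · rw [if_pos hij, if_pos hij]
    have hji : j ≤ i := by exact_mod_cast hij
    have hcast2 : ((i : Int) - (j : Int)) = ((i - j : Nat) : Int) := by rw [Nat.cast_sub hji]
    simp only [hcast1, hcast2, get2_comm, set2_comm]
  · rw [if_neg hij, if_neg hij]
    simp only [hcast1, get2_comm, set2_comm]

theorem innerStep_comm' (st : Array (Array Int)) (i : Nat) (j : Int) (hj : 1 ≤ j) :
    toL (innerStepA st (i : Int) j) = innerStepL (toL st) (i : Int) j := by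
  obtain ⟨j', rfl⟩ : ∃ j' : Nat, j = (j' : Int) := ⟨j.toNat, by omega⟩
  exact innerStep_comm st i j' (by exact_mod_cast hj)

theorem rowA_comm (n : Nat) (st : Array (Array Int)) (i : Nat) (hn : 1 ≤ n) :
    toL (rowA (n : Int) st (i : Int)) = rowL (n : Int) (toL st) (i : Int) := by
  have aux : ∀ m : Nat,
      toL ((PySem.List.pyRange 1 ((m : Int) + 1) 1).foldl (fun st j => innerStepA st (i : Int) j) st)
        = (PySem.List.pyRange 1 ((m : Int) + 1) 1).foldl (fun st j => innerStepL st (i : Int) j) (toL st) := by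
    intro m
    induction m with
    | zero => rw [PySem.List.pyRange_one_eq_nil (by norm_num)]; rfl
    | succ m ih =>
      rw [show ((m + 1 : Nat) : Int) + 1 = ((m : Int) + 1) + 1 by push_cast; ring,
        PySem.List.pyRange_one_succ_right (by omega), List.foldl_append, List.foldl_append]
      simp only [List.foldl_cons, List.foldl_nil]
      rw [innerStep_comm' _ i ((m : Int) + 1) (by omega), ih]
  unfold rowA rowL
  have h := aux (n - 1)
  rw [show ((n - 1 : Nat) : Int) + 1 = (n : Int) by
    push_cast [Nat.cast_sub (show 1 ≤ n by omega)]; ring] at h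
  exact h

theorem solution_comm (n : Nat) (hn : 3 ≤ n) : solution (n : Int) = solutionL (n : Int) := by
  unfold solution solutionL
  set A0 := Array.replicate ((n : Int) + 1).toNat (Array.replicate ((n : Int)).toNat (0 : Int)) with hA0
  have h0 : toL A0 = List.replicate ((n : Int) + 1).toNat (List.replicate ((n : Int)).toNat (0 : Int)) := by
    rw [hA0]; unfold toL
    rw [Array.toList_replicate, List.map_replicate, Array.toList_replicate]
  have e0 : toL (set2 A0 0 0 1) = set2L (toL A0) 0 0 1 := by simpa using set2_comm A0 0 0 1
  set A1 := set2 A0 0 0 1 with hA1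
  have e1 : toL (set2 A1 1 1 1) = set2L (toL A1) 1 1 1 := by simpa using set2_comm A1 1 1 1
  set A2 := set2 A1 1 1 1 with hA2
  have e2 : toL (set2 A2 2 2 1) = set2L (toL A2) 2 2 1 := by simpa using set2_comm A2 2 2 1
  set A3 := set2 A2 2 2 1 with hA3
  have aux : ∀ i : Nat,
      toL ((PySem.List.pyRange 0 (i : Int) 1).foldl (rowA (n : Int)) A3)
        = (PySem.List.pyRange 0 (i : Int) 1).foldl (rowL (n : Int)) (toL A3) := by
    intro i
    induction i with
    | zero =>
      rw [show ((0 : Nat) : Int) = 0 by norm_num, PySem.List.pyRange_one_eq_nil (le_refl 0)]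
      rfl
    | succ i ih =>
      rw [show ((i + 1 : Nat) : Int) = (i : Int) + 1 by push_cast; ring,
        PySem.List.pyRange_one_succ_right (by positivity), List.foldl_append, List.foldl_append]
      simp only [List.foldl_cons, List.foldl_nil]
      rw [rowA_comm n _ i (by omega), ih]
  have hfold := aux (n + 1)
  rw [show ((n + 1 : Nat) : Int) = (n : Int) + 1 by push_cast; ring] at hfold
  have hfin : get2 ((PySem.List.pyRange 0 ((n : Int) + 1) 1).foldl (rowA (n : Int)) A3) (n : Int) ((n : Int) - 1)
      = get2L ((PySem.List.pyRange 0 ((n : Int) + 1) 1).foldl (rowL (n : Int)) (toL A3)) (n : Int) ((n : Int) - 1) := by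
    rw [show ((n : Int) - 1) = ((n - 1 : Nat) : Int) by
      push_cast [Nat.cast_sub (show 1 ≤ n by omega)]; ring]
    rw [get2_comm, hfold]
  have hA3L : toL A3 = set2L (set2L (set2L
      (List.replicate ((n : Int) + 1).toNat (List.replicate ((n : Int)).toNat (0 : Int))) 0 0 1) 1 1 1) 2 2 1 := by
    rw [hA3, e2, hA2, e1, hA1, e0, h0]
  rw [hfin, hA3L]

-- ---- bridges for port B's rows table ----
theorem arow_getD (rows : Array (Array Int)) (m k : Nat) :
    (rows.getD m #[]).getD k 0 = ((toL rows).getD m []).getD k 0 := by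
  rw [toL_getD, agetD_toList]

theorem rowOfB_comm (kmax : Nat) (rows : Array (Array Int)) (m : Nat) :
    (rowOfB kmax rows m).toList = rowOfBL kmax (toL rows) m := by
  unfold rowOfB rowOfBL
  rw [List.toList_toArray]
  congr 1
  apply List.map_congr_left
  intro k hk
  rw [arow_getD, arow_getD]

theorem rowsB_comm (kmax : Nat) : ∀ t : Nat,
    toL ((List.range' 1 t).foldl (fun rows m => rows.push (rowOfB kmax rows m))
        #[((1 : Int) :: List.replicate kmax 0).toArray])
      = (List.range' 1 t).foldl (fun rows m => rows ++ [rowOfBL kmax rows m])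
        [1 :: List.replicate kmax 0] := by
  intro t
  induction t with
  | zero => unfold toL; simp
  | succ t ih =>
    rw [List.range'_concat, List.foldl_append, List.foldl_append]
    simp only [List.foldl_cons, List.foldl_nil, Nat.one_mul]
    rw [← ih]
    unfold toL
    rw [Array.toList_push, List.map_append, List.map_singleton, rowOfB_comm]
    rfl

theorem tri_mono {a b : Nat} (h : a ≤ b) : tri a ≤ tri b := by
  rw [tri_eq, tri_eq]
  exact Nat.div_le_div_right (Nat.mul_le_mul h (by omega))

theorem trunc_sum (n K : Nat) (hKn : K ≤ n) (hgt : n < tri (K + 2)) :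
    ∑ i ∈ Finset.range (K - 1), Pp (n - tri (i + 2)) (i + 2)
      = ∑ i ∈ Finset.range (n - 1), Pp (n - tri (i + 2)) (i + 2) := by
  have hsub : Finset.range (K - 1) ⊆ Finset.range (n - 1) := by
    intro x hx
    simp only [Finset.mem_range] at hx ⊢
    omega
  refine Finset.sum_subset hsub ?_
  intro i hi hni
  rw [Finset.mem_range, not_lt] at hni
  have hm : tri (K + 2) ≤ tri (i + 2 + 1) := tri_mono (by omega)
  have ht : tri (i + 2 + 1) = tri (i + 2) + (i + 2) := by simp [tri]
  exact Pp_lt _ _ (by omega)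

theorem solution_alt_eq (n : Nat) (hn : 3 ≤ n) : solution_alt (n : Int) = Q n (n - 1) := by
  set K := kmaxAux (n : Int) 0 with hK
  -- post-conditions of the while loop
  have hgt : n < tri (K + 2) := by
    have hpost := kmaxAux_post (n : Int) 0
    rw [← hK] at hpost
    have : n < (K + 1) * (K + 2) / 2 := by
      by_contra hcon
      exact hpost (by exact_mod_cast Nat.le_of_not_lt hcon)
    rw [tri_eq]
    calc n < (K + 1) * (K + 2) / 2 := this
    _ = (K + 2) * (K + 2 - 1) / 2 := by rw [show K + 2 - 1 = K + 1 by omega, Nat.mul_comm]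
  have hK2 : 2 ≤ K := by
    by_contra hcon
    have h3 : tri (K + 2) ≤ 3 := by
      have hb : K < 2 := by omega
      interval_cases K <;> simp [tri]
    omega
  have hle : tri (K + 1) ≤ n := by
    have hpost2 := kmaxAux_post2 (n : Int) 0 (Or.inl rfl)
    rw [← hK] at hpost2
    rcases hpost2 with h0 | h
    · omega
    · have : K * (K + 1) / 2 ≤ n := by exact_mod_cast h
      rw [tri_eq]
      calc (K + 1) * (K + 1 - 1) / 2 = K * (K + 1) / 2 := by
            rw [show K + 1 - 1 = K by omega, Nat.mul_comm]
      _ ≤ n := this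
  have hKn : K ≤ n := by
    have : K ≤ tri (K + 1) := by simp [tri]
    omega
  -- evaluate the port
  have hnn : ((n : Int)).toNat = n := Int.toNat_natCast n
  rw [solution_alt]
  simp only [← hK, hnn, if_neg (show ¬ K < 2 by omega)]
  have hentry : ∀ k : Nat,
      ((((List.range' 1 n).foldl (fun rows m => rows.push (rowOfB K rows m))
          #[((1 : Int) :: List.replicate K 0).toArray]).getD (n - k * (k - 1) / 2) #[]).getD k 0)
        = ((((List.range (n + 1)).map (rowP K)).getD (n - k * (k - 1) / 2) []).getD k 0) := by
    intro k
    rw [arow_getD, rowsB_comm K n, rows_eq K n]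
  simp only [hentry]
  -- the list sum equals a Finset sum of Pp values
  have hstep : ((List.range' 2 (K - 1)).map (fun k =>
      ((((List.range (n + 1)).map (rowP K)).getD (n - k * (k - 1) / 2) []).getD k 0))).sum
      = ∑ i ∈ Finset.range (K - 1), Pp (n - tri (i + 2)) (i + 2) := by
    rw [List.range'_eq_map_range, List.map_map, sum_map_range]
    apply Finset.sum_congr rfl
    intro i hi
    rw [Finset.mem_range] at hi
    show ((((List.range (n + 1)).map (rowP K)).getD (n - (2 + i) * (2 + i - 1) / 2) []).getD (2 + i) 0) = _
    rw [← tri_eq, getD_rowsP K n _ (by omega), getD_rowP K _ (2 + i) (by omega),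
      show 2 + i = i + 2 by omega]
  rw [hstep]
  -- the q-value as a Finset sum of Pp values
  have hQ1 : Q n n = Q n (n - 1) + 1 := by
    conv_lhs => rw [show n = (n - 1) + 1 by omega]
    simp only [Q]
    rw [show (n - 1) + 1 = n by omega, if_pos (le_refl n), Nat.sub_self, Q_zero_left]
  have hQ2 : Q n n = ∑ k ∈ Finset.range (n + 1), Pp (n - tri k) k := by
    rw [Q_sum n n (n + 1) (by omega)]
    exact Finset.sum_congr rfl fun k _ => Eb_ge n k n (le_refl n)
  -- peel k = 0 and k = 1, truncate above K
  have hpeel : ∑ k ∈ Finset.range (n + 1), Pp (n - tri k) k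
      = (∑ i ∈ Finset.range (n - 1), Pp (n - tri (i + 2)) (i + 2)) + 1 := by
    obtain ⟨m, hm⟩ : ∃ m, n = m + 2 := ⟨n - 2, by omega⟩
    subst hm
    rw [show m + 2 + 1 = (m + 1 + 1) + 1 from rfl, Finset.sum_range_succ',
      Finset.sum_range_succ']
    simp only [tri, Nat.sub_zero, Nat.add_zero]
    rw [Pp_k_zero, if_neg (by omega), Pp_one, if_pos (by omega)]
    rw [show m + 2 - 1 = m + 1 from rfl]
    ring
  have htrunc := trunc_sum n K hKn hgt
  omega
theorem solution_eq (n : Nat) (hn : 3 ≤ n) : solution (n : Int) = Q n (n - 1) := by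
  rw [solution_comm n hn, solutionL_eq n hn]

-- ===== VERDICT (by name: the statement is the Claim_ definition above) =====
theorem solution_spec : Claim_equal_solution := by
  intro bricks _ hpre
  unfold Spec_solution Pre_solution at *
  obtain ⟨n, rfl⟩ : ∃ n : Nat, bricks = (n : Int) := ⟨bricks.toNat, by omega⟩
  have hn : 3 ≤ n := by exact_mod_cast hpre
  rw [solution_eq n hn, solution_alt_eq n hn]
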